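-- pv_equiv track=rewrite | github.com/vltmn/aoc | python/y2024/code/day4.py | _occurs_with_delta
-- ===== SOURCE A (Python) =====
-- def _occurs_with_delta(pos: tuple[int, int], matrix: list[list[chr]], chars: str, dy: int, dx: int) -> bool:
--     xmax = len(matrix[0]) - 1
--     ymax = len(matrix) - 1
--     ddx = dx
--     ddy = dy
--     for c in chars:
--         xpos = pos[0] + ddx
--         ypos = pos[1] + ddy
--         if xpos < 0 or ypos < 0 or xpos > xmax or ypos > ymax:
--             return False
--         matrix_value = matrix[ypos][xpos]
--         if matrix_value != c:
--             return False
--         ddx += dx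
--         ddy += dy
--     return True
-- ===== SOURCE B (Python) =====
-- def _occurs_with_delta(pos, matrix, chars, dy, dx):
--     # Gather-then-compare: collect the cells along the ray, then compare once.
--     h, w = len(matrix), len(matrix[0])
--     got = []
--     for i in range(1, len(chars) + 1):
--         x, y = pos[0] + i * dx, pos[1] + i * dy
--         if not (0 <= x < w and 0 <= y < h and x < len(matrix[y])):
--             return False
--         got.append(matrix[y][x])
--     return got == list(chars)
-- ===== Notes on version B (the rewrite author's own statement) =====
-- stated objective: simpler
-- what changed: Replaces the interleaved walk (running ddx/ddy accumulators, per-step character comparison with early exit) by a gather-then-compare decomposition: compute each position directly as pos + i*delta, collect the in-bounds cells into a list, and make one final comparison against list(chars); Pre_ excludes only the inputs on which A raises IndexError (empty matrix, or a ray reaching a ragged row shorter than row 0).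
import Mathlib
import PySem

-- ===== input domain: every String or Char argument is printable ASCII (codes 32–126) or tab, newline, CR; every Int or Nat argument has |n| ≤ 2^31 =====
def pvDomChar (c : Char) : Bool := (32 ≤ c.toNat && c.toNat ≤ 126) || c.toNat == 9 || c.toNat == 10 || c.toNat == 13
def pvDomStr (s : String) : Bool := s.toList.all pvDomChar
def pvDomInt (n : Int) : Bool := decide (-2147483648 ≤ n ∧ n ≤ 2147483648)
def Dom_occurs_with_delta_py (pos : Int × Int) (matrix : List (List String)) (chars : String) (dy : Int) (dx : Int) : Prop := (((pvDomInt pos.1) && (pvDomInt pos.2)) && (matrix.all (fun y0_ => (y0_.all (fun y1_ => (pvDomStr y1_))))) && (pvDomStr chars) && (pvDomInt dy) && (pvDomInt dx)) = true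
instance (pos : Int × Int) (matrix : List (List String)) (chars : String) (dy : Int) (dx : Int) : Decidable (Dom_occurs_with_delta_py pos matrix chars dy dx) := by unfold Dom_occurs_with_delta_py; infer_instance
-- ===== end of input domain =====

-- B replaces A's interleaved walk (running ddx/ddy, per-step compare with early exit) by a
-- gather-then-compare decomposition (collect the cells along the ray, one final comparison);
-- objective: simpler.

-- ===== PORT A =====
-- the for-loop with its two early returns, as structural recursion over the characters,
-- carrying the running offsets ddx, ddy exactly as A does
def owdA_loop (matrix : List (List String)) (xmax ymax : Int) (pos : Int × Int)
    (dy dx : Int) : List Char → Int → Int → Bool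
  | [], _, _ => true
  | c :: cs, ddx, ddy =>
    let xpos := pos.1 + ddx
    let ypos := pos.2 + ddy
    if xpos < 0 ∨ ypos < 0 ∨ xpos > xmax ∨ ypos > ymax then false
    else if PySem.List.pyGetD (PySem.List.pyGetD matrix ypos []) xpos "" ≠ String.ofList [c] then false
    else owdA_loop matrix xmax ymax pos dy dx cs (ddx + dx) (ddy + dy)

def occurs_with_delta_py (pos : Int × Int) (matrix : List (List String)) (chars : String) (dy : Int) (dx : Int) : Bool :=
  -- matrix[0] raises IndexError on an empty matrix and matrix[ypos][xpos] on a reached ragged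
  -- short row (both excluded by Pre_); pyGetD is exact wherever Python A actually indexes
  let xmax : Int := ((PySem.List.pyGetD matrix 0 []).length : Int) - 1
  let ymax : Int := (matrix.length : Int) - 1
  owdA_loop matrix xmax ymax pos dy dx chars.toList dx dy

-- ===== PORT B =====
-- Source B's for-loop over range(1, len(chars)+1) with its early `return False`, as recursion over
-- the index list, accumulating the gathered cells; none = the early False return
def owdB_loop (matrix : List (List String)) (w h : Int) (pos : Int × Int) (dy dx : Int) :
    List Int → List String → Option (List String)
  | [], got => some got
  | i :: is, got =>
    let x := pos.1 + i * dx
    let y := pos.2 + i * dy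
    -- `matrix[y]` is read by Python only after 0 ≤ y < h, so pyGetD matrix y [] is exact;
    -- `matrix[y][x]` only after x < len(matrix[y]), so the inner pyGetD is exact too
    if x < 0 ∨ y < 0 ∨ x ≥ w ∨ y ≥ h ∨ x ≥ ((PySem.List.pyGetD matrix y []).length : Int) then none
    else owdB_loop matrix w h pos dy dx is (got ++ [PySem.List.pyGetD (PySem.List.pyGetD matrix y []) x ""])

def occurs_with_delta_py_alt (pos : Int × Int) (matrix : List (List String)) (chars : String) (dy : Int) (dx : Int) : Bool :=
  -- len(matrix[0]) raises IndexError on an empty matrix, exactly as A does (excluded by Pre_)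
  let h : Int := (matrix.length : Int)
  let w : Int := ((PySem.List.pyGetD matrix 0 []).length : Int)
  match owdB_loop matrix w h pos dy dx (PySem.List.pyRange 1 ((chars.length : Int) + 1) 1) [] with
  | none => false
  | some got => decide (got = chars.toList.map (fun c => String.ofList [c]))

-- ===== PRECONDITION & SPEC =====
-- Pre_ excludes EXACTLY the inputs on which Python A raises IndexError (and nothing A returns on):
-- the empty matrix (len(matrix[0])), and rays whose first k steps are all in the row-0-based
-- bounds and match chars while step k+1 is in those bounds but lands on a ragged row shorter
-- than row 0 — there A's matrix[ypos][xpos] raises.  B raises on the very same empty-matrix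
-- inputs and returns False on the ragged ones, so nothing returned by A is excluded.
def Pre_occurs_with_delta_py (pos : Int × Int) (matrix : List (List String)) (chars : String) (dy : Int) (dx : Int) : Prop :=
  matrix ≠ [] ∧
  ∀ k ∈ List.range chars.length,
    (∀ j ∈ List.range k,
        (0 ≤ pos.1 + ((j : Int) + 1) * dx ∧ 0 ≤ pos.2 + ((j : Int) + 1) * dy ∧
         pos.1 + ((j : Int) + 1) * dx < ((matrix.headD []).length : Int) ∧
         pos.2 + ((j : Int) + 1) * dy < (matrix.length : Int)) ∧
        PySem.List.pyGetD (PySem.List.pyGetD matrix (pos.2 + ((j : Int) + 1) * dy) [])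
            (pos.1 + ((j : Int) + 1) * dx) ""
          = String.ofList [chars.toList.getD j ' ']) →
    ((0 ≤ pos.1 + ((k : Int) + 1) * dx ∧ 0 ≤ pos.2 + ((k : Int) + 1) * dy ∧
      pos.1 + ((k : Int) + 1) * dx < ((matrix.headD []).length : Int) ∧
      pos.2 + ((k : Int) + 1) * dy < (matrix.length : Int)) →
     pos.1 + ((k : Int) + 1) * dx
       < ((PySem.List.pyGetD matrix (pos.2 + ((k : Int) + 1) * dy) []).length : Int))
instance (pos : Int × Int) (matrix : List (List String)) (chars : String) (dy : Int) (dx : Int) : Decidable (Pre_occurs_with_delta_py pos matrix chars dy dx) := by unfold Pre_occurs_with_delta_py; infer_instance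

def pvWitness_occurs_with_delta_py : (Int × Int) × List (List String) × String × Int × Int :=
  ((0, 0), [["X", "M"], ["A", "S"]], "M", 0, 1)

def Spec_occurs_with_delta_py (pos : Int × Int) (matrix : List (List String)) (chars : String) (dy : Int) (dx : Int) (out : Bool) : Prop := out = occurs_with_delta_py_alt pos matrix chars dy dx
instance (pos : Int × Int) (matrix : List (List String)) (chars : String) (dy : Int) (dx : Int) (out : Bool) : Decidable (Spec_occurs_with_delta_py pos matrix chars dy dx out) := by unfold Spec_occurs_with_delta_py; infer_instance

-- ===== CLAIM (what is proved, stated in full; the proofs are below) =====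
def Claim_equal_occurs_with_delta_py : Prop := ∀ (pos : Int × Int) (matrix : List (List String)) (chars : String) (dy : Int) (dx : Int), Dom_occurs_with_delta_py pos matrix chars dy dx → Pre_occurs_with_delta_py pos matrix chars dy dx → Spec_occurs_with_delta_py pos matrix chars dy dx (occurs_with_delta_py pos matrix chars dy dx)

-- ===== LEMMAS AND PROOFS =====

-- a one-character string is never the empty string (A's mismatch test on a default read)
theorem pvOfListSingletonNeEmpty (c : Char) : ¬ String.ofList [c] = "" := by
  intro h
  have := congrArg String.toList h
  simp at this

-- the accumulator only collects: the loop's result is its result from [] with `got` prepended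
theorem owdB_loop_acc (matrix : List (List String)) (w h : Int) (pos : Int × Int) (dy dx : Int)
    (is : List Int) (got : List String) :
    owdB_loop matrix w h pos dy dx is got
      = (owdB_loop matrix w h pos dy dx is []).map (fun g => got ++ g) := by
  induction is generalizing got with
  | nil => simp [owdB_loop]
  | cons i is ih =>
    simp only [owdB_loop]
    split_ifs with hcond
    · rfl
    · rw [ih, ih ([] ++ _)]
      simp [Option.map_map, Function.comp_def]

theorem owd_main (matrix : List (List String)) (pos : Int × Int) (dy dx : Int)
    (cs : List Char) (i : Int) :
    (match owdB_loop matrix ((PySem.List.pyGetD matrix 0 []).length : Int)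
        ((matrix.length : Int)) pos dy dx (PySem.List.pyRange i (i + (cs.length : Int)) 1) [] with
      | none => false
      | some got => decide (got = cs.map (fun c => String.ofList [c])))
      = owdA_loop matrix (((PySem.List.pyGetD matrix 0 []).length : Int) - 1)
          ((matrix.length : Int) - 1) pos dy dx cs (i * dx) (i * dy) := by
  induction cs generalizing i with
  | nil =>
    rw [show i + ((List.length ([] : List Char) : Nat) : Int) = i by simp,
        PySem.List.pyRange_one_eq_nil le_rfl]
    simp [owdB_loop, owdA_loop]
  | cons c cs ih =>
    have hlen : (((c :: cs).length : Nat) : Int) = (cs.length : Int) + 1 := by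
      push_cast [List.length_cons]; ring
    rw [hlen, PySem.List.pyRange_one_cons (by omega)]
    simp only [owdB_loop, owdA_loop]
    by_cases hb : pos.1 + i * dx < 0 ∨ pos.2 + i * dy < 0 ∨
        pos.1 + i * dx > ((PySem.List.pyGetD matrix 0 []).length : Int) - 1 ∨
        pos.2 + i * dy > (matrix.length : Int) - 1
    · rw [if_pos (by omega), if_pos hb]
    · rw [if_neg hb]
      by_cases hr : pos.1 + i * dx
          ≥ ((PySem.List.pyGetD matrix (pos.2 + i * dy) []).length : Int)
      · -- ragged row shorter than x: the gather returns None; A reads the default "" and mismatches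
        rw [if_pos (by omega)]
        have hget : PySem.List.pyGetD (PySem.List.pyGetD matrix (pos.2 + i * dy) [])
            (pos.1 + i * dx) "" = "" := by
          have hx0 : 0 ≤ pos.1 + i * dx := by omega
          have hnone : PySem.List.pyGet? (PySem.List.pyGetD matrix (pos.2 + i * dy) [])
              (pos.1 + i * dx) = none := by
            rw [PySem.List.pyGet?_eq_none_iff]
            intro hir
            rcases hir with ⟨_, hlt⟩; omega
          simp only [PySem.List.pyGetD] at hnone ⊢
          rw [hnone]
          rfl
        rw [if_pos (by rw [hget]; exact fun h => pvOfListSingletonNeEmpty c h.symm)]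
      · rw [if_neg (by omega), owdB_loop_acc,
            show i + ((cs.length : Int) + 1) = (i + 1) + (cs.length : Int) by ring]
        have h2 := ih (i + 1)
        by_cases hm : PySem.List.pyGetD (PySem.List.pyGetD matrix (pos.2 + i * dy) [])
            (pos.1 + i * dx) "" = String.ofList [c]
        · rw [if_neg (by simpa using hm)]
          cases hres : owdB_loop matrix ((PySem.List.pyGetD matrix 0 []).length : Int)
              ((matrix.length : Int)) pos dy dx
              (PySem.List.pyRange (i + 1) ((i + 1) + (cs.length : Int)) 1) [] with
          | none =>
            rw [hres] at h2
            simpa [show i * dx + dx = (i + 1) * dx by ring,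
                   show i * dy + dy = (i + 1) * dy by ring] using h2
          | some g =>
            rw [hres] at h2
            simpa [hm, show i * dx + dx = (i + 1) * dx by ring,
                   show i * dy + dy = (i + 1) * dy by ring] using h2
        · rw [if_pos (by simpa using hm)]
          cases hres : owdB_loop matrix ((PySem.List.pyGetD matrix 0 []).length : Int)
              ((matrix.length : Int)) pos dy dx
              (PySem.List.pyRange (i + 1) ((i + 1) + (cs.length : Int)) 1) [] with
          | none => simp
          | some g => simp [hm]

-- ===== VERDICT (by name: the statement is the Claim_ definition above) =====
theorem occurs_with_delta_py_spec : Claim_equal_occurs_with_delta_py := by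
  intro pos matrix chars dy dx _ _
  unfold Spec_occurs_with_delta_py occurs_with_delta_py occurs_with_delta_py_alt
  have h := owd_main matrix pos dy dx chars.toList 1
  rw [show (1 : Int) + (chars.toList.length : Int) = (chars.length : Int) + 1 by
        rw [String.length_toList]; omega,
      show (1 : Int) * dx = dx by ring, show (1 : Int) * dy = dy by ring] at h
  exact h.symm
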